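-- pv_equiv track=rewrite | github.com/bradb423/bradley-aoc | project_euler/problem26/problem26.py | longest_reciprocal
-- ===== SOURCE A (Python) =====
-- def reciprocal_length(d):
--     length = 1
--     while (10**length)%d != 1:
--         length +=1
--         if length > d:
--             return 0 # probably not worth looking at if it's not a reptend prime
--     return length
--
-- def longest_reciprocal(prime_sieve):
--     final_d_value = 1
--     longest_length = 1
--
--     for d in prime_sieve:
--         length = reciprocal_length(d)
--         if length > longest_length:
--             longest_length = length
--             final_d_value = d
--
--
--     return final_d_value, longest_length
-- ===== SOURCE B (Python) =====
-- def longest_reciprocal(prime_sieve):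
--     # maintain the running remainder of the long division instead of recomputing 10**length each step;
--     # skip d that cannot have a recurring cycle (d <= 1 or d sharing a factor with 10)
--     best_d, best_len = 1, 1
--     for d in prime_sieve:
--         if d <= 1 or d % 2 == 0 or d % 5 == 0:
--             continue
--         r = 10 % d
--         length = 1
--         while r != 1:
--             r = (10 * r) % d
--             length += 1
--         if length > best_len:
--             best_d, best_len = d, length
--     return best_d, best_len
-- ===== Notes on version B (the rewrite author's own statement) =====
-- stated objective: faster
-- what changed: reciprocal_length's loop recomputing the big-number power 10**length mod d each step is replaced by maintaining the long-division remainder r=(10*r)%d, with an up-front skip of d<=1 and d sharing a factor with 10 (for which A's search always ends in 0).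
import Mathlib
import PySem

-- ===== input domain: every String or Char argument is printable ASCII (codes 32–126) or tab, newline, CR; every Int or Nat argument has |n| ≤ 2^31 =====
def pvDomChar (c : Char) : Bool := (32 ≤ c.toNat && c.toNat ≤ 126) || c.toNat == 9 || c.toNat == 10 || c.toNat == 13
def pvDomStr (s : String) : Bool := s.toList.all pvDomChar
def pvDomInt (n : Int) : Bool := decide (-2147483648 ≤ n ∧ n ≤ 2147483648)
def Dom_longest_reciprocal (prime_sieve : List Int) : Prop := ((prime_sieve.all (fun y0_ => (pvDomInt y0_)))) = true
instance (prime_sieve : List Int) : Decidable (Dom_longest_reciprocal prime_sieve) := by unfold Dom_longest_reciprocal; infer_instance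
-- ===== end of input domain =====

-- B maintains the long-division remainder (10*r) % d instead of recomputing 10**length % d each
-- step, and skips d ≤ 1 / d sharing a factor with 10 up front; return value only (a tuple),
-- rendered as a two-element list.

-- ===== PORT A =====
-- while (10**length)%d != 1: length += 1; if length > d: return 0
def reciprocal_length_go (d : Int) (length : Int) : Int :=
  if PySem.Int.mod (10 ^ length.toNat) d ≠ 1 then
    if length + 1 > d then 0
    else reciprocal_length_go d (length + 1)
  else length
termination_by (d + 1 - length).toNat
decreasing_by omega

def reciprocal_length (d : Int) : Int := reciprocal_length_go d 1

def longest_reciprocal (prime_sieve : List Int) : List Int :=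
  let p := prime_sieve.foldl (fun (st : Int × Int) d =>
    let length := reciprocal_length d
    if length > st.2 then (d, length) else st) (1, 1)
  [p.1, p.2]

-- ===== PORT B =====
-- the while loop of Source B; the fuel argument is a totality guard only (proved sufficient below:
-- the remainder returns to 1 after order-of-10 < d steps)
def cycle_loop (d : Int) (r : Int) (length : Int) : Nat → Int
  | 0 => length
  | fuel + 1 =>
    if r ≠ 1 then cycle_loop d (PySem.Int.mod (10 * r) d) (length + 1) fuel
    else length

def longest_reciprocal_alt (prime_sieve : List Int) : List Int :=
  let p := prime_sieve.foldl (fun (st : Int × Int) d =>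
    if d ≤ 1 ∨ PySem.Int.mod d 2 = 0 ∨ PySem.Int.mod d 5 = 0 then st
    else
      let length := cycle_loop d (PySem.Int.mod 10 d) 1 d.toNat
      if length > st.2 then (d, length) else st) (1, 1)
  [p.1, p.2]

-- ===== PRECONDITION & SPEC =====
-- Pre_ excludes lists containing 0, on which A raises ZeroDivisionError.
def Pre_longest_reciprocal (prime_sieve : List Int) : Prop := (0 : Int) ∉ prime_sieve
instance (prime_sieve : List Int) : Decidable (Pre_longest_reciprocal prime_sieve) := by unfold Pre_longest_reciprocal; infer_instance
def pvWitness_longest_reciprocal : List Int := [3, 7, 11, 13]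

def Spec_longest_reciprocal (prime_sieve : List Int) (out : List Int) : Prop := out = longest_reciprocal_alt prime_sieve
instance (prime_sieve : List Int) (out : List Int) : Decidable (Spec_longest_reciprocal prime_sieve out) := by unfold Spec_longest_reciprocal; infer_instance

-- ===== CLAIM (what is proved, stated in full; the proofs are below) =====
def Claim_equal_longest_reciprocal : Prop := ∀ (prime_sieve : List Int), Dom_longest_reciprocal prime_sieve → Pre_longest_reciprocal prime_sieve → Spec_longest_reciprocal prime_sieve (longest_reciprocal prime_sieve)

-- ===== LEMMAS AND PROOFS =====

-- A's inner loop returns 0 whenever no power of 10 is ≡ 1 (mod d)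
theorem go_eq_zero_aux (d : Int) (hnever : ∀ j : Nat, 1 ≤ j → PySem.Int.mod (10 ^ j) d ≠ 1) :
    ∀ (m : Nat) (length : Int), (d + 1 - length).toNat ≤ m → 1 ≤ length →
      reciprocal_length_go d length = 0 := by
  intro m
  induction m with
  | zero =>
    intro length hm h1
    rw [reciprocal_length_go, if_pos (hnever length.toNat (by omega)), if_pos (by omega)]
  | succ m ih =>
    intro length hm h1
    rw [reciprocal_length_go, if_pos (hnever length.toNat (by omega))]
    by_cases hgt : length + 1 > d
    · rw [if_pos hgt]
    · rw [if_neg hgt]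
      exact ih (length + 1) (by omega) (by omega)

theorem go_eq_zero (d : Int) (hnever : ∀ j : Nat, 1 ≤ j → PySem.Int.mod (10 ^ j) d ≠ 1) :
    ∀ length : Int, 1 ≤ length → reciprocal_length_go d length = 0 := fun length h1 =>
  go_eq_zero_aux d hnever (d + 1 - length).toNat length le_rfl h1

-- A's inner loop finds the least k ≥ 1 with 10^k ≡ 1 (mod d), given k < d
theorem go_eq_k (d : Int) (k : Nat) (hk1 : 1 ≤ k) (hkd : (k : Int) < d)
    (hQk : PySem.Int.mod (10 ^ k) d = 1)
    (hmin : ∀ j : Nat, 1 ≤ j → j < k → PySem.Int.mod (10 ^ j) d ≠ 1) :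
    ∀ length : Int, 1 ≤ length → length ≤ (k : Int) → reciprocal_length_go d length = k := by
  have main : ∀ (m : Nat) (length : Int), ((k : Int) - length).toNat ≤ m → 1 ≤ length →
      length ≤ (k : Int) → reciprocal_length_go d length = k := by
    intro m
    induction m with
    | zero =>
      intro length hm h1 hle
      have hEq : length = (k : Int) := by omega
      subst hEq
      rw [reciprocal_length_go]
      have ht : ((k : Int)).toNat = k := by omega
      rw [ht, if_neg (by simpa using hQk)]
    | succ m ih =>
      intro length hm h1 hle
      by_cases hEq : length = (k : Int)
      · subst hEq
        rw [reciprocal_length_go]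
        have ht : ((k : Int)).toNat = k := by omega
        rw [ht, if_neg (by simpa using hQk)]
      · have hlt : length < (k : Int) := lt_of_le_of_ne hle hEq
        rw [reciprocal_length_go, if_pos (hmin length.toNat (by omega) (by omega)),
          if_neg (by omega)]
        exact ih (length + 1) (by omega) (by omega) (by omega)
  exact fun length h1 hle => main ((k : Int) - length).toNat length le_rfl h1 hle

theorem mod_mul_step (x d : Int) (hd : 0 < d) :
    PySem.Int.mod (10 * PySem.Int.mod x d) d = PySem.Int.mod (10 * x) d := by
  rw [PySem.Int.mod_eq_emod_of_pos hd, PySem.Int.mod_eq_emod_of_pos hd,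
    PySem.Int.mod_eq_emod_of_pos hd]
  conv_rhs => rw [Int.mul_emod]
  rw [Int.mul_emod]
  simp [Int.emod_emod_of_dvd]

-- B's inner loop finds the same k
theorem loop_eq_k (d : Int) (k : Nat) (hk1 : 1 ≤ k) (hd : 0 < d)
    (hQk : PySem.Int.mod (10 ^ k) d = 1)
    (hmin : ∀ j : Nat, 1 ≤ j → j < k → PySem.Int.mod (10 ^ j) d ≠ 1) :
    ∀ (fuel : Nat) (length : Int), 1 ≤ length → length ≤ (k : Int) →
      (k : Int) - length ≤ (fuel : Int) →
      cycle_loop d (PySem.Int.mod (10 ^ length.toNat) d) length fuel = k := by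
  intro fuel
  induction fuel with
  | zero =>
    intro length h1 hle hfuel
    have : length = (k : Int) := by omega
    simpa [cycle_loop] using this
  | succ fuel ih =>
    intro length h1 hle hfuel
    by_cases hEq : length = (k : Int)
    · subst hEq
      have ht : ((k : Int)).toNat = k := by omega
      rw [cycle_loop, ht, if_neg (by simpa using hQk)]
    · have hlt : length < (k : Int) := lt_of_le_of_ne hle hEq
      rw [cycle_loop, if_pos (hmin length.toNat (by omega) (by omega)),
        mod_mul_step _ _ hd]
      have hpow : 10 * (10 : Int) ^ length.toNat = 10 ^ (length + 1).toNat := by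
        have ht : (length + 1).toNat = length.toNat + 1 := by omega
        rw [ht, pow_succ]
        ring
      rw [hpow]
      exact ih (length + 1) (by omega) (by omega) (by omega)

-- existence of the order, with bound, for good d
theorem order_exists (d : Int) (hd : 2 ≤ d) (h2 : ¬ (2 : Int) ∣ d) (h5 : ¬ (5 : Int) ∣ d) :
    ∃ k : Nat, 1 ≤ k ∧ (k : Int) < d ∧ PySem.Int.mod (10 ^ k) d = 1 ∧
      (∀ j : Nat, 1 ≤ j → j < k → PySem.Int.mod (10 ^ j) d ≠ 1) := by
  have hd0 : 0 < d := by omega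
  set n : Nat := d.toNat with hn
  have hdn : d = (n : Int) := by omega
  have hn2 : 2 ≤ n := by omega
  have h2n : ¬ 2 ∣ n := by
    intro h
    exact h2 (by rw [hdn]; exact_mod_cast Nat.cast_dvd_cast (α := Int) h)
  have h5n : ¬ 5 ∣ n := by
    intro h
    exact h5 (by rw [hdn]; exact_mod_cast Nat.cast_dvd_cast (α := Int) h)
  have hcop : Nat.Coprime 10 n := by
    have c2 : Nat.Coprime 2 n := (Nat.Prime.coprime_iff_not_dvd Nat.prime_two).2 h2n
    have c5 : Nat.Coprime 5 n := (Nat.Prime.coprime_iff_not_dvd (by norm_num)).2 h5n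
    have : Nat.Coprime (2 * 5) n := Nat.Coprime.mul_left c2 c5
    simpa using this
  -- reduce the PySem mod statement to a Nat mod statement
  have hQ : ∀ j : Nat, PySem.Int.mod (10 ^ j) d = 1 ↔ 10 ^ j % n = 1 := by
    intro j
    rw [PySem.Int.mod_eq_emod_of_pos hd0, hdn]
    constructor
    · intro h
      have : ((10 ^ j % n : Nat) : Int) = 1 := by push_cast; exact h
      exact_mod_cast this
    · intro h
      have : ((10 ^ j % n : Nat) : Int) = 1 := by exact_mod_cast h
      push_cast at this
      exact this
  have hex : ∃ k : Nat, 0 < k ∧ 10 ^ k % n = 1 := by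
    refine ⟨n.totient, Nat.totient_pos.2 (by omega), ?_⟩
    have := Nat.ModEq.pow_totient hcop
    have h1n : 1 % n = 1 := Nat.mod_eq_of_lt (by omega)
    unfold Nat.ModEq at this
    omega
  classical
  refine ⟨Nat.find hex, (Nat.find_spec hex).1, ?_, (hQ _).2 (Nat.find_spec hex).2, ?_⟩
  · have hle : Nat.find hex ≤ n.totient := Nat.find_min' hex
      ⟨Nat.totient_pos.2 (by omega), by
        have := Nat.ModEq.pow_totient hcop
        have h1n : 1 % n = 1 := Nat.mod_eq_of_lt (by omega)
        unfold Nat.ModEq at this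
        omega⟩
    have : n.totient < n := Nat.totient_lt n (by omega)
    omega
  · intro j hj1 hjk h
    exact Nat.find_min hex hjk ⟨by omega, (hQ j).1 h⟩

-- per-element: for d ≠ 0 the two fold steps agree (given best length ≥ 1)
theorem step_eq (st : Int × Int) (hst : 1 ≤ st.2) (d : Int) (hd : d ≠ 0) :
    (let length := reciprocal_length d
     if length > st.2 then (d, length) else st) =
    (if d ≤ 1 ∨ PySem.Int.mod d 2 = 0 ∨ PySem.Int.mod d 5 = 0 then st
     else
       let length := cycle_loop d (PySem.Int.mod 10 d) 1 d.toNat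
       if length > st.2 then (d, length) else st) := by
  by_cases hbad : d ≤ 1 ∨ PySem.Int.mod d 2 = 0 ∨ PySem.Int.mod d 5 = 0
  · rw [if_pos hbad]
    have hzero : reciprocal_length d = 0 := by
      rcases hbad with hle | hdvd | hdvd
      · -- d ≤ 1 and d ≠ 0 : either d = 1 or d < 0; one loop step returns 0
        rcases (by omega : d = 1 ∨ d < 0) with h1 | hneg
        · subst h1
          rw [reciprocal_length, reciprocal_length_go,
            if_pos (by norm_num [PySem.Int.mod_eq_emod_of_pos]), if_pos (by norm_num)]
        · have hb := PySem.Int.mod_neg_bounds (a := 10 ^ ((1 : Int)).toNat) hneg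
          rw [reciprocal_length, reciprocal_length_go, if_pos (by omega), if_pos (by omega)]
      all_goals {
        first
        | (have hp : (2 : Int) ∣ d := (PySem.Int.mod_eq_zero_iff_dvd d 2).1 hdvd
           have hpn : ¬ (2 : Int) ∣ 1 := by norm_num
           have hp10 : ∀ j : Nat, 1 ≤ j → (2 : Int) ∣ 10 ^ j :=
             fun j hj => dvd_pow (by norm_num) (by omega))
        | (have hp : (5 : Int) ∣ d := (PySem.Int.mod_eq_zero_iff_dvd d 5).1 hdvd
           have hpn : ¬ (5 : Int) ∣ 1 := by norm_num
           have hp10 : ∀ j : Nat, 1 ≤ j → (5 : Int) ∣ 10 ^ j :=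
             fun j hj => dvd_pow (by norm_num) (by omega))
        rcases (by omega : d ≤ 1 ∨ 2 ≤ d) with hle | hge
        · rcases (by omega : d = 1 ∨ d < 0) with h1 | hneg
          · subst h1
            rw [reciprocal_length, reciprocal_length_go,
              if_pos (by norm_num [PySem.Int.mod_eq_emod_of_pos]), if_pos (by norm_num)]
          · have hb := PySem.Int.mod_neg_bounds (a := 10 ^ ((1 : Int)).toNat) hneg
            rw [reciprocal_length, reciprocal_length_go, if_pos (by omega), if_pos (by omega)]
        · refine go_eq_zero d ?_ 1 le_rfl
          intro j hj h
          have hmod : PySem.Int.mod (10 ^ j) d = (10 ^ j) % d :=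
            PySem.Int.mod_eq_emod_of_pos (by omega)
          have hdvd1 : d ∣ 10 ^ j - 1 := Int.dvd_self_sub_of_emod_eq (by rw [← hmod, h])
          have h1 := dvd_sub (hp10 j hj) (dvd_trans hp hdvd1)
          rw [sub_sub_cancel] at h1
          exact hpn h1 }
    show (if reciprocal_length d > st.2 then (d, reciprocal_length d) else st) = st
    rw [hzero, if_neg (by omega)]
  · rw [if_neg hbad]
    push Not at hbad
    obtain ⟨hd1, h2, h5⟩ := hbad
    have hd2 : 2 ≤ d := by omega
    obtain ⟨k, hk1, hkd, hQk, hmin⟩ := order_exists d hd2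
      (fun h => h2 ((PySem.Int.mod_eq_zero_iff_dvd d 2).2 h))
      (fun h => h5 ((PySem.Int.mod_eq_zero_iff_dvd d 5).2 h))
    have hA : reciprocal_length d = k :=
      go_eq_k d k hk1 hkd hQk hmin 1 le_rfl (by omega)
    have hB : cycle_loop d (PySem.Int.mod 10 d) 1 d.toNat = k := by
      have h10 : PySem.Int.mod 10 d = PySem.Int.mod (10 ^ ((1 : Int)).toNat) d := by norm_num
      rw [h10]
      exact loop_eq_k d k hk1 (by omega) hQk hmin d.toNat 1 le_rfl (by omega) (by omega)
    show (if reciprocal_length d > st.2 then (d, reciprocal_length d) else st) =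
      (if cycle_loop d (PySem.Int.mod 10 d) 1 d.toNat > st.2 then
        (d, cycle_loop d (PySem.Int.mod 10 d) 1 d.toNat) else st)
    rw [hA, hB]

-- ===== VERDICT (by name: the statement is the Claim_ definition above) =====
theorem fold_eq :
    ∀ (l : List Int) (st : Int × Int), (∀ d ∈ l, d ≠ 0) → 1 ≤ st.2 →
      l.foldl (fun (st : Int × Int) d =>
        let length := reciprocal_length d
        if length > st.2 then (d, length) else st) st =
      l.foldl (fun (st : Int × Int) d =>
        if d ≤ 1 ∨ PySem.Int.mod d 2 = 0 ∨ PySem.Int.mod d 5 = 0 then st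
        else
          let length := cycle_loop d (PySem.Int.mod 10 d) 1 d.toNat
          if length > st.2 then (d, length) else st) st := by
  intro l
  induction l with
  | nil => intro st _ _; rfl
  | cons d l ih =>
    intro st hne hst
    rw [List.foldl_cons, List.foldl_cons, ← step_eq st hst d (hne d (by simp))]
    have hst' : 1 ≤ (let length := reciprocal_length d;
        if length > st.2 then (d, length) else st).2 := by
      show 1 ≤ (if reciprocal_length d > st.2 then (d, reciprocal_length d) else st).2
      by_cases h : reciprocal_length d > st.2
      · rw [if_pos h]; omega
      · rw [if_neg h]; omega
    exact ih _ (fun x hx => hne x (by simp [hx])) hst'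

theorem longest_reciprocal_spec : Claim_equal_longest_reciprocal := by
  intro ps _ hpre
  unfold Spec_longest_reciprocal longest_reciprocal longest_reciprocal_alt
  rw [fold_eq ps (1, 1) (fun d hd h0 => hpre (h0 ▸ hd)) (by norm_num)]
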